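-- pv_equiv track=rewrite | github.com/jschnab/leetcode | arrays/triangular_sum_array.py | pascal_triangle
-- ===== SOURCE A (Python) =====
-- def pascal_triangle(A):
--     """
--     We note that the coefficient to apply to each element of the input array
--     to arrive at the result for Pascal's triangle.
--
--     https://en.wikipedia.org/wiki/Pascal%27s_triangle
--
--     Pascal's triangle is made of binomial coefficient, so we can use the
--     multiplicative formula to calculate these coefficients. We apply the
--     coefficients to array elements to calculate the solution in a single
--     array iteration.
--
--     Starting at coefficient mCk, the next one mC(k+1) is:
--     mCk * (m - k) / (k + 1)
--
--     https://en.wikipedia.org/wiki/Binomial_coefficient#Multiplicative_formula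
--     """
--     m = len(A) - 1  # we get coefficient from the mth level of the triangle
--     mCk = 1  # initial binomial coefficient
--     result = 0
--     for i, n in enumerate(A):
--         result = (result + mCk * n) % 10
--         mCk = mCk * (m - i) // (i + 1)
--     return result
-- ===== SOURCE B (Python) =====
-- def pascal_triangle(A):
--     if not A:
--         return 0
--     cur = list(A)
--     while len(cur) > 1:
--         cur = [(cur[i] + cur[i + 1]) % 10 for i in range(len(cur) - 1)]
--     return cur[0] % 10
-- ===== Notes on version B (the rewrite author's own statement) =====
-- stated objective: alternative
-- what changed: Replaces A's single-pass binomial-coefficient weighted sum (maintaining mCk via the multiplicative formula) with the direct triangular reduction: repeatedly collapse adjacent pairs mod 10 until one element remains.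
import Mathlib
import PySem

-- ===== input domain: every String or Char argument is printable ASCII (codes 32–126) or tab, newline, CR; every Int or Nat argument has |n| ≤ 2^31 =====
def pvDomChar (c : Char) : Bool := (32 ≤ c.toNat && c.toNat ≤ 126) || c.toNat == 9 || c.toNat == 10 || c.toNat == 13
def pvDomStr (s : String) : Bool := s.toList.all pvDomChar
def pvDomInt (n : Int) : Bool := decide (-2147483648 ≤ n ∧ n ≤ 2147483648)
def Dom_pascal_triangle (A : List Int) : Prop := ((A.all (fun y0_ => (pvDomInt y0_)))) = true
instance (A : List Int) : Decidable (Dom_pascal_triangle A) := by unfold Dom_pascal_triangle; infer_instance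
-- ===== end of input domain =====

-- B replaces A's single-pass binomial-coefficient sum by the direct triangular reduction
-- (repeated adjacent-pair collapsing mod 10): an alternative, plainer algorithm, not faster.

-- ===== PORT A =====
-- literal port of A: state (result, mCk), one pass over enumerate(A)
def pascal_triangle (A : List Int) : Int :=
  let m : Int := (A.length : Int) - 1
  ((PySem.List.enumerate A 0).foldl
      (fun (st : Int × Int) (p : Int × Int) =>
        ((st.1 + st.2 * p.2) % 10, PySem.Int.floordiv (st.2 * (m - p.1)) (p.1 + 1)))
      (0, 1)).1

-- ===== PORT B =====
-- one collapsing step: the list [(cur[i] + cur[i+1]) % 10 for i in range(len(cur)-1)]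
def pvCollapse : List Int → List Int
  | a :: b :: t => (a + b) % 10 :: pvCollapse (b :: t)
  | _ => []

lemma pvCollapse_length : ∀ (l : List Int), (pvCollapse l).length = l.length - 1
  | [] => rfl
  | [_] => rfl
  | _ :: b :: t => by simp [pvCollapse, pvCollapse_length (b :: t)]

-- the while loop: collapse until one element remains, return it mod 10
def pvReduce : List Int → Int
  | [] => 0
  | [a] => a % 10
  | a :: b :: t => pvReduce (pvCollapse (a :: b :: t))
  termination_by l => l.length
  decreasing_by simp [pvCollapse_length]

def pascal_triangle_alt (A : List Int) : Int := pvReduce A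

-- ===== PRECONDITION & SPEC =====
def Spec_pascal_triangle (A : List Int) (out : Int) : Prop := out = pascal_triangle_alt A
instance (A : List Int) (out : Int) : Decidable (Spec_pascal_triangle A out) := by unfold Spec_pascal_triangle; infer_instance

-- ===== CLAIM (what is proved, stated in full; the proofs are below) =====
def Claim_equal_pascal_triangle : Prop := ∀ (A : List Int), Dom_pascal_triangle A → Spec_pascal_triangle A (pascal_triangle A)

-- ===== LEMMAS AND PROOFS =====

-- binomially weighted sum in ZMod 10: wz n k xs = Σ_i C(n, k+i) * xs[i]
def wz (n k : Nat) : List Int → ZMod 10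
  | [] => 0
  | x :: t => (n.choose k : ZMod 10) * (x : ZMod 10) + wz n (k + 1) t

-- A's fold, abstracted over the start state (proof helper)
def foldA (N : Nat) (ps : List (Int × Int)) (st : Int × Int) : Int × Int :=
  ps.foldl
    (fun (st : Int × Int) (p : Int × Int) =>
      ((st.1 + st.2 * p.2) % 10, PySem.Int.floordiv (st.2 * ((N : Int) - p.1)) (p.1 + 1)))
    st

lemma cast_emod10 (a : Int) : (((a % 10 : Int)) : ZMod 10) = (a : ZMod 10) := by
  have h : a % 10 ≡ a [ZMOD (10:Nat)] := Int.emod_emod_of_dvd a dvd_rfl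
  exact (ZMod.intCast_eq_intCast_iff _ _ _).2 h

lemma collapse_wz : ∀ (t : List Int) (a : Int) (n k : Nat),
    wz n k (pvCollapse (a :: t)) =
      wz n k (a :: t) + wz n k t
        - (n.choose (k + t.length) : ZMod 10) * (((a :: t).getLast (by simp) : Int) : ZMod 10)
  | [], a, n, k => by simp [pvCollapse, wz]
  | b :: t', a, n, k => by
      have ih := collapse_wz t' b n (k + 1)
      simp only [pvCollapse, wz, cast_emod10] at ih ⊢
      rw [ih]
      have hlast : (a :: b :: t').getLast (by simp) = (b :: t').getLast (by simp) :=
        List.getLast_cons (by simp)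
      rw [hlast]
      have hlen : k + (b :: t').length = k + 1 + t'.length := by
        simp; omega
      rw [hlen]
      push_cast
      ring

lemma pascal_wz : ∀ (t : List Int) (a : Int) (n k : Nat),
    wz n k (a :: t) + wz n k t =
      wz (n + 1) k (a :: t) + (n.choose k : ZMod 10) * (a : ZMod 10)
        - ((n + 1).choose k : ZMod 10) * (a : ZMod 10)
  | [], _, _, _ => by simp only [wz]; ring
  | b :: t', a, n, k => by
      have ih := pascal_wz t' b n (k + 1)
      have hP : (((n + 1).choose (k + 1) : Nat) : ZMod 10)
          = (n.choose k : ZMod 10) + (n.choose (k + 1) : ZMod 10) := by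
        rw [Nat.choose_succ_succ]; push_cast; ring
      simp only [wz] at ih ⊢
      linear_combination ih - ((b : Int) : ZMod 10) * hP

lemma reduce_range : ∀ (l : List Int), 0 ≤ pvReduce l ∧ pvReduce l < 10
  | [] => by simp [pvReduce]
  | [a] => by
      simp only [pvReduce]
      exact ⟨Int.emod_nonneg a (by norm_num), Int.emod_lt_of_pos a (by norm_num)⟩
  | a :: b :: t => by
      rw [pvReduce]
      exact reduce_range (pvCollapse (a :: b :: t))
  termination_by l => l.length
  decreasing_by simp [pvCollapse_length]

lemma reduce_wz : ∀ (l : List Int), l ≠ [] →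
    ((pvReduce l : Int) : ZMod 10) = wz (l.length - 1) 0 l
  | [], h => absurd rfl h
  | [a], _ => by simp [pvReduce, wz, cast_emod10]
  | a :: b :: t, _ => by
      rw [pvReduce]
      have hne : pvCollapse (a :: b :: t) ≠ [] := by
        have := pvCollapse_length (a :: b :: t)
        intro h; rw [h] at this; simp at this
      have ih := reduce_wz (pvCollapse (a :: b :: t)) hne
      rw [ih, pvCollapse_length]
      have hcol := collapse_wz (b :: t) a ((a :: b :: t).length - 1 - 1) 0
      have hzero : (((a :: b :: t).length - 1 - 1).choose (0 + (b :: t).length) : ZMod 10) = 0 := by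
        rw [Nat.choose_eq_zero_of_lt (by simp)]
        norm_cast
      rw [hzero, zero_mul, sub_zero] at hcol
      rw [show pvCollapse (a :: b :: t) = pvCollapse (a :: (b :: t)) from rfl, hcol]
      have hpas := pascal_wz (b :: t) a ((a :: b :: t).length - 1 - 1) 0
      simp only [Nat.choose_zero_right, Nat.cast_one, one_mul] at hpas
      rw [hpas]
      have h1 : (a :: b :: t).length - 1 - 1 + 1 = (a :: b :: t).length - 1 := by simp
      rw [h1]
      ring
  termination_by l => l.length
  decreasing_by simp [pvCollapse_length]

-- A-side loop invariant: running the fold from index j with coefficient C(N, j)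
lemma foldA_inv : ∀ (ys : List Int) (j : Nat) (r : Int) (N : Nat),
    j + ys.length ≤ N + 1 →
    (((foldA N (PySem.List.enumerate ys (j : Int)) (r, (N.choose j : Int))).1 : ZMod 10)
        = (r : ZMod 10) + wz N j ys)
      ∧ (ys ≠ [] → 0 ≤ (foldA N (PySem.List.enumerate ys (j : Int)) (r, (N.choose j : Int))).1
          ∧ (foldA N (PySem.List.enumerate ys (j : Int)) (r, (N.choose j : Int))).1 < 10)
      ∧ (ys = [] → (foldA N (PySem.List.enumerate ys (j : Int)) (r, (N.choose j : Int))).1 = r)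
  | [], j, r, N, _ => by
      simp [foldA, PySem.List.enumerate_nil, wz]
  | x :: ys, j, r, N, hle => by
      have hj : j ≤ N := by simp at hle; omega
      have hcast1 : ((j : Int) + 1) = ((j + 1 : Nat) : Int) := by push_cast; ring
      have hcoef : PySem.Int.floordiv ((N.choose j : Int) * ((N : Int) - (j : Int))) ((j + 1 : Nat) : Int)
          = (N.choose (j + 1) : Int) := by
        have hsub : (N : Int) - (j : Int) = ((N - j : Nat) : Int) := by omega
        rw [hsub,
          show (N.choose j : Int) * ((N - j : Nat) : Int) = ((N.choose j * (N - j) : Nat) : Int) by push_cast; ring,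
          PySem.Int.floordiv_natCast]
        congr 1
        rw [← Nat.choose_succ_right_eq]
        exact Nat.mul_div_cancel _ (by omega)
      have ih := foldA_inv ys (j + 1) ((r + (N.choose j : Int) * x) % 10) N (by simp at hle ⊢; omega)
      simp only [foldA] at ih ⊢
      rw [PySem.List.enumerate_cons, List.foldl_cons, hcast1, hcoef]
      refine ⟨?_, fun _ => ?_, fun h => by simp at h⟩
      · rw [ih.1, cast_emod10]
        simp only [wz]
        push_cast
        ring
      · rcases eq_or_ne ys [] with h | h
        · rw [ih.2.2 h]
          exact ⟨Int.emod_nonneg _ (by norm_num), Int.emod_lt_of_pos _ (by norm_num)⟩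
        · exact ih.2.1 h

lemma int_eq_of_zmod10 (x y : Int) (hx : 0 ≤ x ∧ x < 10) (hy : 0 ≤ y ∧ y < 10)
    (h : (x : ZMod 10) = (y : ZMod 10)) : x = y := by
  have hm : x % (10:Nat) = y % (10:Nat) := (ZMod.intCast_eq_intCast_iff _ _ _).1 h
  have hx' : x % (10:Int) = x := Int.emod_eq_of_lt hx.1 hx.2
  have hy' : y % (10:Int) = y := Int.emod_eq_of_lt hy.1 hy.2
  omega

-- ===== VERDICT (by name: the statement is the Claim_ definition above) =====
theorem pascal_triangle_spec : Claim_equal_pascal_triangle := by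
  intro A _
  show pascal_triangle A = pascal_triangle_alt A
  cases A with
  | nil => simp [pascal_triangle, pascal_triangle_alt, pvReduce, PySem.List.enumerate_nil]
  | cons a t =>
      have hm : (((a :: t).length : Int) - 1) = ((((a :: t).length - 1 : Nat)) : Int) := by
        simp
      have hA : pascal_triangle (a :: t)
          = (foldA ((a :: t).length - 1)
              (PySem.List.enumerate (a :: t) ((0 : Nat) : Int))
              (0, ((((a :: t).length - 1).choose 0 : Nat) : Int))).1 := by
        simp only [pascal_triangle, foldA, hm, Nat.choose_zero_right, Nat.cast_one, Nat.cast_zero]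
      have hinv := foldA_inv (a :: t) 0 0 ((a :: t).length - 1) (by simp)
      have hcast : ((pascal_triangle (a :: t) : Int) : ZMod 10)
          = wz ((a :: t).length - 1) 0 (a :: t) := by
        rw [hA, hinv.1]; push_cast; ring
      have hrange : 0 ≤ pascal_triangle (a :: t) ∧ pascal_triangle (a :: t) < 10 := by
        rw [hA]; exact hinv.2.1 (by simp)
      have hBcast : ((pascal_triangle_alt (a :: t) : Int) : ZMod 10)
          = wz ((a :: t).length - 1) 0 (a :: t) :=
        reduce_wz (a :: t) (by simp)
      exact int_eq_of_zmod10 _ _ hrange (reduce_range (a :: t)) (by rw [hcast, hBcast])
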